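-- pv_equiv track=rewrite | github.com/ChenHaoyuan/qq-spider | login.py | __translate_qrsig_to_ptqrtoken
-- ===== SOURCE A (Python) =====
-- def __translate_qrsig_to_ptqrtoken(t):
--     e = 0
--     i = 0
--     n = len(t)
--     while n > i:
--         e = e + (e << 5) + ord(t[i])
--         i = i + 1
--     return str(2147483647 & e)
-- ===== SOURCE B (Python) =====
-- def __translate_qrsig_to_ptqrtoken(t):
--     # Back-to-front weighted-sum decomposition, done mod 2**31 throughout:
--     # the final `2147483647 &` is just `% 2**31` on a nonnegative sum, so
--     # reducing the running sum and power of 33 each step changes nothing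
--     # and keeps every intermediate a machine-sized int.
--     M = 2 ** 31
--     s = 0
--     power = 1
--     for c in reversed(t):
--         s = (s + ord(c) * power) % M
--         power = power * 33 % M
--     return str(2147483647 & s)
-- ===== Notes on version B (the rewrite author's own statement) =====
-- stated objective: faster
-- what changed: Replaces A's unbounded big-int Horner accumulator (e = e + (e<<5) + ord(c), front-to-back) by a back-to-front weighted-sum pass keeping a running power of 33 with both sum and power reduced mod 2**31 each step (the final mask equals mod 2**31 on the nonnegative accumulator).
import Mathlib
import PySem

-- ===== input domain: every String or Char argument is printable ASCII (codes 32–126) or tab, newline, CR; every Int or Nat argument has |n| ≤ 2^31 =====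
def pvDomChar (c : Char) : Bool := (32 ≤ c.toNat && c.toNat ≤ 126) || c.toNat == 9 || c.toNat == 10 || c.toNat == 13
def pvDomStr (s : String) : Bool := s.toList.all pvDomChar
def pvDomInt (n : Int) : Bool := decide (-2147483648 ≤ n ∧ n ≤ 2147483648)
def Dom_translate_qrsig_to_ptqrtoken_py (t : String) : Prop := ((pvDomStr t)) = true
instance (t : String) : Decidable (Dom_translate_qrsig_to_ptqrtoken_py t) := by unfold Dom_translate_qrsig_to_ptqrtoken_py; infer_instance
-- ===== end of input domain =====

-- B replaces A's unbounded Horner accumulator by a back-to-front weighted-sum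
-- pass with a running power of 33, reduced mod 2^31 each step (faster: the
-- intermediates stay machine-sized instead of growing with the input).


-- ===== PORT A =====
-- while n > i: e = e + (e << 5) + ord(t[i]); i += 1   (e << 5 = e * 32)
def pvALoop : Int → List Char → Int
  | e, [] => e
  | e, c :: cs => pvALoop (e + e * 32 + (c.toNat : Int)) cs

def translate_qrsig_to_ptqrtoken_py (t : String) : String :=
  PySem.Int.toStr (PySem.Int.band 2147483647 (pvALoop 0 t.toList))

-- ===== PORT B =====
-- for c in reversed(t): s = (s + ord(c)*power) % 2**31; power = power*33 % 2**31
def pvBLoop : Int × Int → List Char → Int × Int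
  | sp, [] => sp
  | (s, power), c :: cs =>
      pvBLoop (PySem.Int.mod (s + (c.toNat : Int) * power) 2147483648,
               PySem.Int.mod (power * 33) 2147483648) cs

def translate_qrsig_to_ptqrtoken_py_alt (t : String) : String :=
  PySem.Int.toStr (PySem.Int.band 2147483647 ((pvBLoop (0, 1) t.toList.reverse).1))

-- ===== PRECONDITION & SPEC =====
def Spec_translate_qrsig_to_ptqrtoken_py (t : String) (out : String) : Prop := out = translate_qrsig_to_ptqrtoken_py_alt t
instance (t : String) (out : String) : Decidable (Spec_translate_qrsig_to_ptqrtoken_py t out) := by unfold Spec_translate_qrsig_to_ptqrtoken_py; infer_instance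

-- ===== CLAIM (what is proved, stated in full; the proofs are below) =====
def Claim_equal_translate_qrsig_to_ptqrtoken_py : Prop := ∀ (t : String), Dom_translate_qrsig_to_ptqrtoken_py t → Spec_translate_qrsig_to_ptqrtoken_py t (translate_qrsig_to_ptqrtoken_py t)

-- ===== LEMMAS AND PROOFS =====

theorem pvALoop_append (e : Int) (l₁ l₂ : List Char) :
    pvALoop e (l₁ ++ l₂) = pvALoop (pvALoop e l₁) l₂ := by
  induction l₁ generalizing e with
  | nil => rfl
  | cons c cs ih => simp [pvALoop, ih]

theorem pvALoop_nonneg (e : Int) (l : List Char) (he : 0 ≤ e) : 0 ≤ pvALoop e l := by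
  induction l generalizing e with
  | nil => exact he
  | cons c cs ih => exact ih _ (by positivity)

theorem pvBLoop_nonneg (s p : Int) (r : List Char) (hs : 0 ≤ s) :
    0 ≤ (pvBLoop (s, p) r).1 := by
  induction r generalizing s p with
  | nil => exact hs
  | cons c cs ih => exact ih _ _ (PySem.Int.mod_nonneg _ (by norm_num))

-- loop invariant: B's reduced sum agrees mod 2^31 with the base-33 value of the
-- already-consumed suffix (= Horner value of its reverse)
theorem pvBLoop_emod (s p : Int) (r : List Char) :
    (pvBLoop (s, p) r).1 % 2147483648 = (s + p * pvALoop 0 r.reverse) % 2147483648 := by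
  induction r generalizing s p with
  | nil => simp [pvBLoop, pvALoop]
  | cons c cs ih =>
      have hmod : ∀ a : Int, PySem.Int.mod a 2147483648 = a % 2147483648 := fun a =>
        PySem.Int.mod_eq_emod_of_pos (a := a) (by norm_num)
      simp only [pvBLoop, List.reverse_cons, pvALoop_append, ih, hmod]
      have h1 : ((s + (c.toNat : Int) * p) % 2147483648) ≡
          s + (c.toNat : Int) * p [ZMOD 2147483648] :=
        Int.emod_emod_of_dvd _ dvd_rfl
      have h2 : ((p * 33) % 2147483648) ≡ p * 33 [ZMOD 2147483648] :=
        Int.emod_emod_of_dvd _ dvd_rfl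
      have h3 := h1.add (h2.mul (Int.ModEq.refl (pvALoop 0 cs.reverse)))
      have h4 : (((s + (c.toNat : Int) * p) % 2147483648) +
          ((p * 33) % 2147483648) * pvALoop 0 cs.reverse) % 2147483648 =
          ((s + (c.toNat : Int) * p) + (p * 33) * pvALoop 0 cs.reverse) % 2147483648 := h3
      rw [h4]
      simp only [pvALoop]
      ring_nf

theorem pvBand_mask (e : Int) (he : 0 ≤ e) :
    PySem.Int.band 2147483647 e = e % 2147483648 := by
  rw [PySem.Int.band_of_nonneg (by norm_num) he]
  have h1 : (2147483647 : Int).toNat = 2 ^ 31 - 1 := by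
    decide
  rw [h1, Nat.and_comm, Nat.and_two_pow_sub_one_eq_mod]
  have h2 : ((e.toNat % 2 ^ 31 : Nat) : Int) = (e.toNat : Int) % (2 ^ 31 : Nat) := by
    push_cast; ring_nf
  rw [h2, Int.toNat_of_nonneg he]
  norm_num

-- ===== VERDICT (by name: the statement is the Claim_ definition above) =====
theorem translate_qrsig_to_ptqrtoken_py_spec : Claim_equal_translate_qrsig_to_ptqrtoken_py := by
  intro t _
  unfold Spec_translate_qrsig_to_ptqrtoken_py translate_qrsig_to_ptqrtoken_py translate_qrsig_to_ptqrtoken_py_alt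
  rw [pvBand_mask _ (pvALoop_nonneg _ _ le_rfl),
      pvBand_mask _ (pvBLoop_nonneg 0 1 _ le_rfl),
      pvBLoop_emod]
  simp
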